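-- pv_equiv track=rewrite | github.com/Jython1415/ai-augmented-research | model-collapse-v2/data/build_citation_units.py | determine_citation_type
-- ===== SOURCE A (Python) =====
-- from typing import Optional
--
-- CITATION_TYPE_PRIORITY = {
--     'link': 3,
--     'author_name': 2,
--     'title_phrase': 1,
--     'indirect': 0,
-- }
--
-- ARXIV_IDS = ['2305.17493']
--
-- DOI_IDS = ['10.1038/s41586-024-07566-y']
--
-- NATURE_URLS = ['nature.com/articles/s41586-024-07566']
--
-- def determine_citation_type(search_term: Optional[str], text: str) -> str:
--     """
--     Determine citation type based on search_term_matched and text content.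
--
--     Priority (highest to lowest):
--     1. 'link' - arxiv URL, DOI, or known paper URLs in text
--     2. 'author_name' - "shumailov" search term or in text
--     3. 'title_phrase' - specific title phrases
--     4. 'indirect' - everything else
--     """
--     types_found = []
--
--     # Check for 'link' type (highest priority)
--     if search_term:
--         if 'arxiv.org' in search_term.lower() or any(arxiv in search_term for arxiv in ARXIV_IDS):
--             types_found.append('link')
--         elif 'doi' in search_term.lower() or any(doi in search_term for doi in DOI_IDS):
--             types_found.append('link')
--
--     text_lower = text.lower()
--     if any(arxiv in text_lower for arxiv in ARXIV_IDS):
--         types_found.append('link')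
--     if any(doi in text_lower for doi in DOI_IDS):
--         types_found.append('link')
--     if any(url in text_lower for url in NATURE_URLS):
--         types_found.append('link')
--
--     # Check for 'author_name' type
--     if search_term and 'shumailov' in search_term.lower():
--         types_found.append('author_name')
--     if 'shumailov' in text_lower:
--         types_found.append('author_name')
--
--     # Check for 'title_phrase' type
--     title_phrases = [
--         'trained on recursively generated',
--         'ai models collapse',
--         'model collapse paper',
--         'model collapse nature',
--         'recursive training collapse',
--     ]
--
--     if search_term:
--         search_term_lower = search_term.lower()
--         for phrase in title_phrases:
--             if phrase in search_term_lower: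
--                 types_found.append('title_phrase')
--                 break
--
--     for phrase in title_phrases:
--         if phrase in text_lower:
--             types_found.append('title_phrase')
--             break
--
--     # If no specific type found, use 'indirect'
--     if not types_found:
--         return 'indirect'
--
--     # Return the highest priority type found
--     unique_types = list(set(types_found))
--     unique_types.sort(key=lambda t: CITATION_TYPE_PRIORITY[t], reverse=True)
--     return unique_types[0]
-- ===== SOURCE B (Python) =====
-- from typing import Optional
--
-- CITATION_TYPE_PRIORITY = {
--     'link': 3,
--     'author_name': 2,
--     'title_phrase': 1,
--     'indirect': 0,
-- }
--
-- ARXIV_IDS = ['2305.17493']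
--
-- DOI_IDS = ['10.1038/s41586-024-07566-y']
--
-- NATURE_URLS = ['nature.com/articles/s41586-024-07566']
--
-- TITLE_PHRASES = [
--     'trained on recursively generated',
--     'ai models collapse',
--     'model collapse paper',
--     'model collapse nature',
--     'recursive training collapse',
-- ]
--
--
-- def determine_citation_type(search_term: Optional[str], text: str) -> str:
--     """Evaluate the categories in strict priority order and return on the
--     first hit; no list, set or sort is needed.  A falsy search_term is
--     treated as the empty string (which contains no keyword)."""
--     st = search_term or ""
--     st_lower = st.lower()
--     text_lower = text.lower()
--
--     if ('arxiv.org' in st_lower or any(a in st for a in ARXIV_IDS)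
--             or 'doi' in st_lower or any(d in st for d in DOI_IDS)
--             or any(a in text_lower for a in ARXIV_IDS)
--             or any(d in text_lower for d in DOI_IDS)
--             or any(u in text_lower for u in NATURE_URLS)):
--         return 'link'
--     if 'shumailov' in st_lower or 'shumailov' in text_lower:
--         return 'author_name'
--     if (any(p in st_lower for p in TITLE_PHRASES)
--             or any(p in text_lower for p in TITLE_PHRASES)):
--         return 'title_phrase'
--     return 'indirect'
-- ===== Notes on version B (the rewrite author's own statement) =====
-- stated objective: simpler
-- what changed: B drops A's types_found list, set-deduplication and priority-keyed sort entirely: it evaluates the categories in strict priority order and returns on the first hit, treating a falsy search_term uniformly as the empty string.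
import Mathlib
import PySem

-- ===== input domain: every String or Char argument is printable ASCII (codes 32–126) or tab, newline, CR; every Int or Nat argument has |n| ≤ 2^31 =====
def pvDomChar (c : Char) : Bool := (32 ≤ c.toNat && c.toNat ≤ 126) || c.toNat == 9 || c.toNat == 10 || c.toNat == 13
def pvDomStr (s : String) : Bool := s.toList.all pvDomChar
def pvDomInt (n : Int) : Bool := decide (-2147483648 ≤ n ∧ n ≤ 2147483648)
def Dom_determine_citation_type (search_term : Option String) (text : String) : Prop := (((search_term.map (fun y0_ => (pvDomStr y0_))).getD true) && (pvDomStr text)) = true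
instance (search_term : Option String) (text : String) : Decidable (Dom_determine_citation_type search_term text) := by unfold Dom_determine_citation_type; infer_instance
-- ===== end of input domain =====

-- B replaces A's list/set/sort machinery by early returns in strict priority order (simpler decomposition).

-- ===== PORT A =====
def CITATION_TYPE_PRIORITY : PySem.Dict String Int :=
  PySem.Dict.ofList [("link", 3), ("author_name", 2), ("title_phrase", 1), ("indirect", 0)]

def ARXIV_IDS : List String := ["2305.17493"]
def DOI_IDS : List String := ["10.1038/s41586-024-07566-y"]
def NATURE_URLS : List String := ["nature.com/articles/s41586-024-07566"]

def title_phrases : List String :=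
  ["trained on recursively generated", "ai models collapse", "model collapse paper",
   "model collapse nature", "recursive training collapse"]

-- A's two `for phrase … break` loops: append once on the first hit, then stop
def phraseLoop (phrases : List String) (s : String) (acc : List String) : List String :=
  match phrases with
  | [] => acc
  | p :: ps => if PySem.Str.isIn p s then acc ++ ["title_phrase"] else phraseLoop ps s acc

def determine_citation_type (search_term : Option String) (text : String) : String :=
  let tf0 : List String := []
  -- if search_term: (None and "" are falsy)
  let tf1 :=
    match search_term with
    | none => tf0
    | some s =>
      if s = "" then tf0
      else if PySem.Str.isIn "arxiv.org" (PySem.Str.lower s) || ARXIV_IDS.any (fun a => PySem.Str.isIn a s) then tf0 ++ ["link"]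
      else if PySem.Str.isIn "doi" (PySem.Str.lower s) || DOI_IDS.any (fun d => PySem.Str.isIn d s) then tf0 ++ ["link"]
      else tf0
  let text_lower := PySem.Str.lower text
  let tf2 := if ARXIV_IDS.any (fun a => PySem.Str.isIn a text_lower) then tf1 ++ ["link"] else tf1
  let tf3 := if DOI_IDS.any (fun d => PySem.Str.isIn d text_lower) then tf2 ++ ["link"] else tf2
  let tf4 := if NATURE_URLS.any (fun u => PySem.Str.isIn u text_lower) then tf3 ++ ["link"] else tf3
  let tf5 :=
    match search_term with
    | none => tf4
    | some s =>
      if s = "" then tf4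
      else if PySem.Str.isIn "shumailov" (PySem.Str.lower s) then tf4 ++ ["author_name"] else tf4
  let tf6 := if PySem.Str.isIn "shumailov" text_lower then tf5 ++ ["author_name"] else tf5
  let tf7 :=
    match search_term with
    | none => tf6
    | some s => if s = "" then tf6 else phraseLoop title_phrases (PySem.Str.lower s) tf6
  let tf8 := phraseLoop title_phrases text_lower tf7
  if tf8 = [] then "indirect"
  else
    let unique_types := PySem.Set.ofList tf8
    let sorted := PySem.List.sorted unique_types (fun t => PySem.Dict.getD CITATION_TYPE_PRIORITY t 0) true
    sorted.headD "indirect"  -- unique_types[0]; the list is nonempty in this branch, so IndexError is unreachable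

-- ===== PORT B =====
def determine_citation_type_alt (search_term : Option String) (text : String) : String :=
  let st := match search_term with | none => "" | some s => s  -- search_term or ""
  let st_lower := PySem.Str.lower st
  let text_lower := PySem.Str.lower text
  if (PySem.Str.isIn "arxiv.org" st_lower || ARXIV_IDS.any (fun a => PySem.Str.isIn a st))
      || (PySem.Str.isIn "doi" st_lower || DOI_IDS.any (fun d => PySem.Str.isIn d st))
      || ARXIV_IDS.any (fun a => PySem.Str.isIn a text_lower)
      || DOI_IDS.any (fun d => PySem.Str.isIn d text_lower)
      || NATURE_URLS.any (fun u => PySem.Str.isIn u text_lower) then "link"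
  else if PySem.Str.isIn "shumailov" st_lower || PySem.Str.isIn "shumailov" text_lower then "author_name"
  else if title_phrases.any (fun p => PySem.Str.isIn p st_lower)
      || title_phrases.any (fun p => PySem.Str.isIn p text_lower) then "title_phrase"
  else "indirect"

-- ===== PRECONDITION & SPEC =====
def Spec_determine_citation_type (search_term : Option String) (text : String) (out : String) : Prop := out = determine_citation_type_alt search_term text
instance (search_term : Option String) (text : String) (out : String) : Decidable (Spec_determine_citation_type search_term text out) := by unfold Spec_determine_citation_type; infer_instance

-- ===== CLAIM (what is proved, stated in full; the proofs are below) =====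
def Claim_equal_determine_citation_type : Prop := ∀ (search_term : Option String) (text : String), Dom_determine_citation_type search_term text → Spec_determine_citation_type search_term text (determine_citation_type search_term text)

-- ===== LEMMAS AND PROOFS =====

-- A's tail with every atomic substring test abstracted to a Bool
def coreA (b1 b2 b3 b4 b5 b6 b7 b8 b9 : Bool) : String :=
  let tf0 : List String := []
  let tf1 := if b1 then tf0 ++ ["link"] else if b2 then tf0 ++ ["link"] else tf0
  let tf2 := if b3 then tf1 ++ ["link"] else tf1
  let tf3 := if b4 then tf2 ++ ["link"] else tf2
  let tf4 := if b5 then tf3 ++ ["link"] else tf3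
  let tf5 := if b6 then tf4 ++ ["author_name"] else tf4
  let tf6 := if b7 then tf5 ++ ["author_name"] else tf5
  let tf7 := if b8 then tf6 ++ ["title_phrase"] else tf6
  let tf8 := if b9 then tf7 ++ ["title_phrase"] else tf7
  if tf8 = [] then "indirect"
  else (PySem.List.sorted (PySem.Set.ofList tf8) (fun t => PySem.Dict.getD CITATION_TYPE_PRIORITY t 0) true).headD "indirect"

-- B with the same atomic tests abstracted
def coreB (b1 b2 b3 b4 b5 b6 b7 b8 b9 : Bool) : String :=
  if b1 || b2 || b3 || b4 || b5 then "link"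
  else if b6 || b7 then "author_name"
  else if b8 || b9 then "title_phrase"
  else "indirect"

theorem core_eq : ∀ b1 b2 b3 b4 b5 b6 b7 b8 b9 : Bool,
    coreA b1 b2 b3 b4 b5 b6 b7 b8 b9 = coreB b1 b2 b3 b4 b5 b6 b7 b8 b9 := by decide

-- the phrase loop appends "title_phrase" exactly when some phrase is a substring
theorem phraseLoop_eq (phrases : List String) (s : String) (acc : List String) :
    phraseLoop phrases s acc =
      if phrases.any (fun p => PySem.Str.isIn p s) then acc ++ ["title_phrase"] else acc := by
  induction phrases with
  | nil => simp [phraseLoop]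
  | cons p ps ih =>
    by_cases h : PySem.Str.isIn p s = true
    · simp at h; simp [phraseLoop, h]
    · simp at h; simp [phraseLoop, h, ih]

-- ===== VERDICT (by name: the statement is the Claim_ definition above) =====
theorem determine_citation_type_spec : Claim_equal_determine_citation_type := by
  intro search_term text _
  show determine_citation_type search_term text = determine_citation_type_alt search_term text
  cases search_term with
  | none =>
    calc determine_citation_type none text
        = coreA false false
            (ARXIV_IDS.any (fun a => PySem.Str.isIn a (PySem.Str.lower text)))
            (DOI_IDS.any (fun d => PySem.Str.isIn d (PySem.Str.lower text)))
            (NATURE_URLS.any (fun u => PySem.Str.isIn u (PySem.Str.lower text)))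
            false
            (PySem.Str.isIn "shumailov" (PySem.Str.lower text))
            false
            (title_phrases.any (fun p => PySem.Str.isIn p (PySem.Str.lower text))) := by
          simp only [determine_citation_type, phraseLoop_eq]; rfl
      _ = _ := by rw [core_eq]; rfl
  | some s =>
    by_cases hs : s = ""
    · subst hs
      calc determine_citation_type (some "") text
          = coreA false false
              (ARXIV_IDS.any (fun a => PySem.Str.isIn a (PySem.Str.lower text)))
              (DOI_IDS.any (fun d => PySem.Str.isIn d (PySem.Str.lower text)))
              (NATURE_URLS.any (fun u => PySem.Str.isIn u (PySem.Str.lower text)))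
              false
              (PySem.Str.isIn "shumailov" (PySem.Str.lower text))
              false
              (title_phrases.any (fun p => PySem.Str.isIn p (PySem.Str.lower text))) := by
            simp only [determine_citation_type, phraseLoop_eq]; rfl
        _ = _ := by rw [core_eq]; rfl
    · calc determine_citation_type (some s) text
          = coreA
              (PySem.Str.isIn "arxiv.org" (PySem.Str.lower s) || ARXIV_IDS.any (fun a => PySem.Str.isIn a s))
              (PySem.Str.isIn "doi" (PySem.Str.lower s) || DOI_IDS.any (fun d => PySem.Str.isIn d s))
              (ARXIV_IDS.any (fun a => PySem.Str.isIn a (PySem.Str.lower text)))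
              (DOI_IDS.any (fun d => PySem.Str.isIn d (PySem.Str.lower text)))
              (NATURE_URLS.any (fun u => PySem.Str.isIn u (PySem.Str.lower text)))
              (PySem.Str.isIn "shumailov" (PySem.Str.lower s))
              (PySem.Str.isIn "shumailov" (PySem.Str.lower text))
              (title_phrases.any (fun p => PySem.Str.isIn p (PySem.Str.lower s)))
              (title_phrases.any (fun p => PySem.Str.isIn p (PySem.Str.lower text))) := by
            simp only [determine_citation_type, phraseLoop_eq, if_neg hs]; rfl
        _ = _ := by rw [core_eq]; rfl
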